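-- pv_equiv track=rewrite | github.com/JoYuKang/TIL_Python | pro/신고 결과 받기.py | solution
-- ===== SOURCE A (Python) =====
-- def solution(id_list, report, k):
--     answer = [0] * len(id_list)
--     report = list(set(report))
--     reports = {x : 0 for x in id_list}
--     reporter = {}
--     reportedPlayer = {}
--     for i in report:
--         temp = i.split()
--         if temp[0] not in reporter:
--             reporter[temp[0]] = set()
--         reporter[temp[0]].add(temp[1])
--
--         if temp[1] not in reportedPlayer:
--             reportedPlayer[temp[1]] = set()
--         reportedPlayer[temp[1]].add(temp[0])
--
--     for j in range(len(id_list)):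
--         if id_list[j] not in reporter:
--                 continue
--         for x in reporter[id_list[j]]:
--             if len(reportedPlayer[x]) >= k:
--                 answer[j] += 1
--
--     return answer
-- ===== SOURCE B (Python) =====
-- def solution(id_list, report, k):
--     pairs = {(w[0], w[1]) for w in (r.split() for r in report)}
--     es = sorted(pairs, key=lambda e: e[1])
--     notified = []
--     i, n = 0, len(es)
--     while i < n:
--         j = i
--         while j < n and es[j][1] == es[i][1]:
--             j += 1
--         if j - i >= k:
--             notified += [a for a, _ in es[i:j]]
--         i = j
--     return [notified.count(x) for x in id_list]
-- ===== Notes on version B (the rewrite author's own statement) =====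
-- stated objective: alternative
-- what changed: Replaces A's dicts-of-sets and per-id dict lookups by a sort-then-scan algorithm: dedupe (reporter, reported) edges, sort them by reported user, find banned users as maximal runs of length >= k in one linear scan, collect the reporters of those runs into a flat list, and read each id's answer off as a plain list count.
import Mathlib
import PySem

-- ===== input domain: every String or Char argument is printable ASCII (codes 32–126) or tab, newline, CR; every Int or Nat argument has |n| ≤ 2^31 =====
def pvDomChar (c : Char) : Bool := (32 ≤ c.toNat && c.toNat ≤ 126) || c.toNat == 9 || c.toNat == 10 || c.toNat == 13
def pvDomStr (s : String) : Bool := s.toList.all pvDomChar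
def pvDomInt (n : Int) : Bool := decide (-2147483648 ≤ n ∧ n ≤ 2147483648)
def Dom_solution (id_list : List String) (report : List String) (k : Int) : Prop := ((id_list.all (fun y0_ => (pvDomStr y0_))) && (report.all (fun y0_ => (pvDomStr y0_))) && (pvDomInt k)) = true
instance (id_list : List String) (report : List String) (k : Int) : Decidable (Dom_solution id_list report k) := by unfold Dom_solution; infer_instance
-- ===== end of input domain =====

-- B replaces A's dicts-of-sets by sort-then-scan: dedupe (reporter, reported) edges, sort by
-- reported, find banned users as runs of length >= k in one scan, flatten those runs' reporters
-- and read each id's answer off as a list count (objective: alternative).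

-- ===== PORT A =====
-- Literal port of A. Python's set/dict iteration order is hash-dependent; the returned counts do
-- not depend on it, and the port uses first-occurrence order. Python's reportedPlayer[x] lookup is
-- ported as getD with an empty-set default: the key is always present when the line is reached.
def solution (id_list : List String) (report : List String) (k : Int) : List Int :=
  let answer : List Int := List.replicate id_list.length 0
  let report2 := PySem.Set.ofList report
  let _reports : PySem.Dict String Int := id_list.foldl (fun d x => d.insert x 0) PySem.Dict.empty
  let rp : PySem.Dict String (PySem.Set String) × PySem.Dict String (PySem.Set String) :=
    report2.foldl (fun rp i =>
      let temp := PySem.Str.split₀ i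
      let t0 := PySem.List.pyGetD temp 0 ""   -- temp[0] (IndexError excluded by Pre_)
      let t1 := PySem.List.pyGetD temp 1 ""   -- temp[1] (IndexError excluded by Pre_)
      let reporter := if rp.1.contains t0 then rp.1 else rp.1.insert t0 PySem.Set.empty
      let reporter := reporter.insert t0 (PySem.Set.add (reporter.getD t0 PySem.Set.empty) t1)
      let reported := if rp.2.contains t1 then rp.2 else rp.2.insert t1 PySem.Set.empty
      let reported := reported.insert t1 (PySem.Set.add (reported.getD t1 PySem.Set.empty) t0)
      (reporter, reported)) (PySem.Dict.empty, PySem.Dict.empty)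
  let reporter := rp.1
  let reportedPlayer := rp.2
  (PySem.List.pyRange 0 (id_list.length : Int) 1).foldl (fun answer j =>
    let idj := PySem.List.pyGetD id_list j ""
    if reporter.contains idj then
      (reporter.getD idj PySem.Set.empty).foldl (fun answer x =>
        if k ≤ PySem.Set.len (reportedPlayer.getD x PySem.Set.empty) then
          PySem.List.pySetD answer j (PySem.List.pyGetD answer j 0 + 1)
        else answer) answer
    else answer) answer

-- ===== PORT B =====
-- The run scan of Source B's outer while loop: at each step the inner while finds the maximal run of
-- edges sharing the current reported user (takeWhile), appends its reporters when the run has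
-- length >= k, and continues after the run (dropWhile).
def runScan (k : Int) : List (String × String) → List String
  | [] => []
  | e :: t =>
    let run := e :: t.takeWhile (fun x => x.2 == e.2)
    let rest := t.dropWhile (fun x => x.2 == e.2)
    (if k ≤ (run.length : Int) then run.map Prod.fst else []) ++ runScan k rest
termination_by l => l.length
decreasing_by exact Nat.lt_succ_of_le (t.length_dropWhile_le _)

-- Literal port of Source B: deduped edges, sorted by reported user, run scan, per-id count.
def solution_alt (id_list : List String) (report : List String) (k : Int) : List Int :=
  let pairs : PySem.Set (String × String) := PySem.Set.ofList (report.map (fun r =>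
      let w := PySem.Str.split₀ r
      (PySem.List.pyGetD w 0 "", PySem.List.pyGetD w 1 "")))
  let es := PySem.List.sorted pairs (fun e => e.2) false
  let notified := runScan k es
  id_list.map (fun x => (notified.count x : Int))

-- ===== PRECONDITION & SPEC =====
-- Pre_ excludes only report strings with fewer than two whitespace-separated tokens, on which the
-- Python A raises IndexError (temp[1]).
def Pre_solution (id_list : List String) (report : List String) (k : Int) : Prop :=
  ∀ r ∈ report, 2 ≤ (PySem.Str.split₀ r).length
instance (id_list : List String) (report : List String) (k : Int) : Decidable (Pre_solution id_list report k) := by unfold Pre_solution; infer_instance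
def pvWitness_solution : List String × List String × Int :=
  (["muzi", "frodo", "apeach"], ["muzi frodo", "apeach frodo"], 2)
def Spec_solution (id_list : List String) (report : List String) (k : Int) (out : List Int) : Prop := out = solution_alt id_list report k
instance (id_list : List String) (report : List String) (k : Int) (out : List Int) : Decidable (Spec_solution id_list report k out) := by unfold Spec_solution; infer_instance

-- ===== CLAIM (what is proved, stated in full; the proofs are below) =====
def Claim_equal_solution : Prop := ∀ (id_list : List String) (report : List String) (k : Int), Dom_solution id_list report k → Pre_solution id_list report k → Spec_solution id_list report k (solution id_list report k)

-- ===== LEMMAS AND PROOFS =====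

-- the (reporter, reported) pair a report string splits into
def pvEdge (r : String) : String × String :=
  (PySem.List.pyGetD (PySem.Str.split₀ r) 0 "", PySem.List.pyGetD (PySem.Str.split₀ r) 1 "")

-- one step of A's grouping fold, seen through getD
theorem pv_grp_step (d : PySem.Dict String (PySem.Set String)) (a b u : String) :
    (((if d.contains a then d else d.insert a PySem.Set.empty).insert a
        (PySem.Set.add ((if d.contains a then d else d.insert a PySem.Set.empty).getD a PySem.Set.empty) b)).getD u PySem.Set.empty)
      = if a = u then PySem.Set.add (d.getD u PySem.Set.empty) b else d.getD u PySem.Set.empty := by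
  by_cases hc : d.contains a
  · simp only [hc, if_true, PySem.Dict.getD_insert]
    by_cases h : u = a
    · subst h; simp
    · rw [if_neg h, if_neg (fun hh => h (Eq.symm hh))]
  · simp only [hc, if_false, Bool.false_eq_true, PySem.Dict.getD_insert]
    by_cases h : u = a
    · subst h; simp [PySem.Dict.getD_of_not_contains d _ (by simpa using hc)]
    · rw [if_neg h, if_neg h, if_neg (fun hh => h (Eq.symm hh))]

-- getD/set bookkeeping for A's answer list
theorem pv_getD_set_self (l : List Int) (j : Nat) (v : Int) (h : j < l.length) : (l.set j v).getD j 0 = v := by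
  rw [List.getD_eq_getElem _ _ (by simpa using h)]; simp

theorem pv_getD_set_ne (l : List Int) (i j : Nat) (v : Int) (h : i ≠ j) : (l.set j v).getD i 0 = l.getD i 0 := by
  simp [List.getD_eq_getElem?_getD, List.getElem?_set_ne (Ne.symm h)]

theorem pv_set_getD_self (l : List Int) (j : Nat) : l.set j (l.getD j 0) = l := by
  by_cases h : j < l.length
  · rw [List.getD_eq_getElem _ _ (by simpa using h)]; exact List.set_getElem_self (by simpa using h)
  · exact List.set_eq_of_length_le (by omega)

-- A's inner loop: all increments land on one index
theorem pv_inner (P : String → Prop) [DecidablePred P] (l : List String) (ans : List Int) (j : Nat) :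
    l.foldl (fun a x => if P x then a.set j (a.getD j 0 + 1) else a) ans
      = ans.set j (ans.getD j 0 + (l.countP (fun x => decide (P x)) : Int)) := by
  induction l generalizing ans with
  | nil =>
    rw [List.foldl_nil, List.countP_nil]
    simpa using (pv_set_getD_self ans j).symm
  | cons x t ih =>
    rw [List.foldl_cons, List.countP_cons]
    by_cases hp : P x
    · rw [if_pos hp, ih]
      by_cases hj : j < ans.length
      · rw [pv_getD_set_self _ _ _ hj, List.set_set]
        congr 1
        simp [hp]
        ring
      · rw [List.set_eq_of_length_le (by simp; omega), List.set_eq_of_length_le (by omega),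
            List.set_eq_of_length_le (by omega)]
    · rw [if_neg hp, ih]
      congr 2
      simp [hp]

-- A's outer loop: length and pointwise value
theorem pv_outer_len (c : Nat → Int) (m : Nat) (ans : List Int) :
    ((List.range m).foldl (fun a j => a.set j (a.getD j 0 + c j)) ans).length = ans.length := by
  induction m generalizing ans with
  | zero => rfl
  | succ n ih =>
    rw [List.range_succ, List.foldl_append, List.foldl_cons, List.foldl_nil, List.length_set, ih]

theorem pv_outer_getD (c : Nat → Int) (m : Nat) (ans : List Int) (i : Nat) :
    ((List.range m).foldl (fun a j => a.set j (a.getD j 0 + c j)) ans).getD i 0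
      = ans.getD i 0 + (if i < m ∧ i < ans.length then c i else 0) := by
  induction m with
  | zero => simp
  | succ n ih =>
    rw [List.range_succ, List.foldl_append, List.foldl_cons, List.foldl_nil]
    by_cases hi : i = n
    · subst hi
      by_cases hl : i < ans.length
      · rw [pv_getD_set_self _ _ _ (by rw [pv_outer_len]; exact hl), ih]
        simp [hl]
      · rw [List.set_eq_of_length_le (by rw [pv_outer_len]; omega), ih]
        simp [hl]
    · rw [pv_getD_set_ne _ _ _ _ hi, ih]
      by_cases hn : i < n
      · simp [hn, Nat.lt_succ_of_lt hn]
      · have : ¬ i < n + 1 := by omega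
        simp [hn, this]

-- A's whole answer loop, as a map over id_list
theorem pv_Aloop (id_list : List String) (k : Int)
    (r1 r2 : PySem.Dict String (PySem.Set String)) :
    ((PySem.List.pyRange 0 (id_list.length : Int) 1).foldl (fun answer j =>
        if r1.contains (PySem.List.pyGetD id_list j "") then
          (r1.getD (PySem.List.pyGetD id_list j "") PySem.Set.empty).foldl (fun answer x =>
            if k ≤ PySem.Set.len (r2.getD x PySem.Set.empty) then
              PySem.List.pySetD answer j (PySem.List.pyGetD answer j 0 + 1)
            else answer) answer
        else answer) (List.replicate id_list.length 0))
      = id_list.map (fun u =>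
          (((r1.getD u PySem.Set.empty).countP
              (fun x => decide (k ≤ PySem.Set.len (r2.getD x PySem.Set.empty)))) : Int)) := by
  rw [PySem.List.pyRange_zero_nat, List.foldl_map]
  simp only [PySem.List.pyGetD_natCast, PySem.List.pySetD_natCast]
  have hbody : (fun (a : List Int) (j : Nat) =>
      if r1.contains (id_list.getD j "") then
        (r1.getD (id_list.getD j "") PySem.Set.empty).foldl (fun a x =>
          if k ≤ PySem.Set.len (r2.getD x PySem.Set.empty) then a.set j (a.getD j 0 + 1) else a) a
      else a)
      = (fun (a : List Int) (j : Nat) => a.set j (a.getD j 0 +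
          (((r1.getD (id_list.getD j "") PySem.Set.empty).countP
            (fun x => decide (k ≤ PySem.Set.len (r2.getD x PySem.Set.empty)))) : Int))) := by
    funext a j
    by_cases hc : r1.contains (id_list.getD j "")
    · rw [if_pos hc, pv_inner]
    · rw [if_neg hc, PySem.Dict.getD_of_not_contains _ _ (by simpa using hc)]
      simp only [PySem.Set.empty, List.countP_nil, Nat.cast_zero, add_zero]
      exact (pv_set_getD_self a j).symm
  rw [hbody]
  apply List.ext_getElem
  · rw [pv_outer_len]; simp
  · intro i h1 h2
    rw [pv_outer_len] at h1
    have hi : i < id_list.length := by simpa using h1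
    rw [← List.getD_eq_getElem _ 0 (by rw [pv_outer_len]; exact h1), pv_outer_getD]
    simp [hi]

-- the members of A's reportedPlayer[x] are exactly the first components of deduped edges into x
theorem pv_perm_fst (report : List String) (x : String) :
    (PySem.Set.ofList (((PySem.Set.ofList report).filter (fun r => (pvEdge r).2 == x)).map (fun r => (pvEdge r).1))).Perm
      (((PySem.Set.ofList (report.map pvEdge)).filter (fun e => e.2 == x)).map (fun e => e.1)) := by
  apply (List.perm_ext_iff_of_nodup (PySem.Set.nodup_ofList _) ?_).mpr
  · intro a
    simp only [PySem.Set.mem_ofList, List.mem_map, List.mem_filter, beq_iff_eq]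
    constructor
    · rintro ⟨r, ⟨hr, h2⟩, h1⟩
      exact ⟨(a, x), ⟨⟨r, hr, by rw [← h1, ← h2]⟩, rfl⟩, rfl⟩
    · rintro ⟨e, ⟨⟨r, hr, he⟩, h2⟩, h1⟩
      exact ⟨r, ⟨hr, by rw [he, h2]⟩, by rw [he, h1]⟩
  · apply List.Nodup.map_on
    · intro e1 h1 e2 h2 hf
      have h1' := (List.mem_filter.mp h1).2
      have h2' := (List.mem_filter.mp h2).2
      simp only [beq_iff_eq] at h1' h2'
      exact Prod.ext hf (h1'.trans h2'.symm)
    · exact (PySem.Set.nodup_ofList _).filter _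

-- the members of A's reporter[u] are exactly the second components of deduped edges out of u
theorem pv_perm_snd (report : List String) (u : String) :
    (PySem.Set.ofList (((PySem.Set.ofList report).filter (fun r => (pvEdge r).1 == u)).map (fun r => (pvEdge r).2))).Perm
      (((PySem.Set.ofList (report.map pvEdge)).filter (fun e => e.1 == u)).map (fun e => e.2)) := by
  apply (List.perm_ext_iff_of_nodup (PySem.Set.nodup_ofList _) ?_).mpr
  · intro b
    simp only [PySem.Set.mem_ofList, List.mem_map, List.mem_filter, beq_iff_eq]
    constructor
    · rintro ⟨r, ⟨hr, h1⟩, h2⟩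
      exact ⟨(u, b), ⟨⟨r, hr, by rw [← h1, ← h2]⟩, rfl⟩, rfl⟩
    · rintro ⟨e, ⟨⟨r, hr, he⟩, h1⟩, h2⟩
      exact ⟨r, ⟨hr, by rw [he, h1]⟩, by rw [he, h2]⟩
  · apply List.Nodup.map_on
    · intro e1 h1 e2 h2 hf
      have h1' := (List.mem_filter.mp h1).2
      have h2' := (List.mem_filter.mp h2).2
      simp only [beq_iff_eq] at h1' h2'
      exact Prod.ext (h1'.trans h2'.symm) hf
    · exact (PySem.Set.nodup_ofList _).filter _

-- A's len(reportedPlayer[x]) equals the distinct-reporter count of x on deduped edges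
theorem pv_len_eq (report : List String) (x : String) :
    (PySem.Set.ofList (((PySem.Set.ofList report).filter (fun r => (pvEdge r).2 == x)).map (fun r => (pvEdge r).1))).length
      = (PySem.Set.ofList (report.map pvEdge)).countP (fun e => e.2 == x) := by
  rw [(pv_perm_fst report x).length_eq, List.length_map, List.countP_eq_length_filter]

-- the per-id value: A's per-id count as a countP over the deduped edge list
theorem pv_per_id (report : List String) (k : Int) (u : String) :
    ((PySem.Set.ofList (((PySem.Set.ofList report).filter (fun r => (pvEdge r).1 == u)).map (fun r => (pvEdge r).2))).countP
        (fun x => decide (k ≤ PySem.Set.len (PySem.Set.ofList (((PySem.Set.ofList report).filter (fun r => (pvEdge r).2 == x)).map (fun r => (pvEdge r).1))))))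
      = (PySem.Set.ofList (report.map pvEdge)).countP
          (fun e => e.1 == u && decide (k ≤ ((PySem.Set.ofList (report.map pvEdge)).countP (fun e' => e'.2 == e.2) : Int))) := by
  rw [(pv_perm_snd report u).countP_eq, List.countP_map, List.countP_filter]
  apply List.countP_congr
  intro e _
  simp only [Function.comp, pv_len_eq, PySem.Set.len]
  rw [Bool.and_comm]

-- A's paired grouping fold: the reporter component, seen through getD
theorem pv_rp1_getD (l : List String)
    (d : PySem.Dict String (PySem.Set String) × PySem.Dict String (PySem.Set String)) (u : String) :
    ((l.foldl (fun rp i =>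
      ((if rp.1.contains (PySem.List.pyGetD (PySem.Str.split₀ i) 0 "") then rp.1 else rp.1.insert (PySem.List.pyGetD (PySem.Str.split₀ i) 0 "") PySem.Set.empty).insert (PySem.List.pyGetD (PySem.Str.split₀ i) 0 "")
         (PySem.Set.add ((if rp.1.contains (PySem.List.pyGetD (PySem.Str.split₀ i) 0 "") then rp.1 else rp.1.insert (PySem.List.pyGetD (PySem.Str.split₀ i) 0 "") PySem.Set.empty).getD (PySem.List.pyGetD (PySem.Str.split₀ i) 0 "") PySem.Set.empty) (PySem.List.pyGetD (PySem.Str.split₀ i) 1 "")),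
       (if rp.2.contains (PySem.List.pyGetD (PySem.Str.split₀ i) 1 "") then rp.2 else rp.2.insert (PySem.List.pyGetD (PySem.Str.split₀ i) 1 "") PySem.Set.empty).insert (PySem.List.pyGetD (PySem.Str.split₀ i) 1 "")
         (PySem.Set.add ((if rp.2.contains (PySem.List.pyGetD (PySem.Str.split₀ i) 1 "") then rp.2 else rp.2.insert (PySem.List.pyGetD (PySem.Str.split₀ i) 1 "") PySem.Set.empty).getD (PySem.List.pyGetD (PySem.Str.split₀ i) 1 "") PySem.Set.empty) (PySem.List.pyGetD (PySem.Str.split₀ i) 0 "")))) d).1).getD u PySem.Set.empty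
      = PySem.Set.update (d.1.getD u PySem.Set.empty)
          ((l.filter (fun r => PySem.List.pyGetD (PySem.Str.split₀ r) 0 "" == u)).map
            (fun r => PySem.List.pyGetD (PySem.Str.split₀ r) 1 "")) := by
  induction l generalizing d with
  | nil => simp [PySem.Set.update_nil]
  | cons r t ih =>
    rw [List.foldl_cons, ih, List.filter_cons]
    dsimp only
    rw [pv_grp_step]
    by_cases h : PySem.List.pyGetD (PySem.Str.split₀ r) 0 "" = u
    · simp [h, PySem.Set.update_cons]
    · simp [h]

-- A's paired grouping fold: the reportedPlayer component, seen through getD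
theorem pv_rp2_getD (l : List String)
    (d : PySem.Dict String (PySem.Set String) × PySem.Dict String (PySem.Set String)) (u : String) :
    ((l.foldl (fun rp i =>
      ((if rp.1.contains (PySem.List.pyGetD (PySem.Str.split₀ i) 0 "") then rp.1 else rp.1.insert (PySem.List.pyGetD (PySem.Str.split₀ i) 0 "") PySem.Set.empty).insert (PySem.List.pyGetD (PySem.Str.split₀ i) 0 "")
         (PySem.Set.add ((if rp.1.contains (PySem.List.pyGetD (PySem.Str.split₀ i) 0 "") then rp.1 else rp.1.insert (PySem.List.pyGetD (PySem.Str.split₀ i) 0 "") PySem.Set.empty).getD (PySem.List.pyGetD (PySem.Str.split₀ i) 0 "") PySem.Set.empty) (PySem.List.pyGetD (PySem.Str.split₀ i) 1 "")),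
       (if rp.2.contains (PySem.List.pyGetD (PySem.Str.split₀ i) 1 "") then rp.2 else rp.2.insert (PySem.List.pyGetD (PySem.Str.split₀ i) 1 "") PySem.Set.empty).insert (PySem.List.pyGetD (PySem.Str.split₀ i) 1 "")
         (PySem.Set.add ((if rp.2.contains (PySem.List.pyGetD (PySem.Str.split₀ i) 1 "") then rp.2 else rp.2.insert (PySem.List.pyGetD (PySem.Str.split₀ i) 1 "") PySem.Set.empty).getD (PySem.List.pyGetD (PySem.Str.split₀ i) 1 "") PySem.Set.empty) (PySem.List.pyGetD (PySem.Str.split₀ i) 0 "")))) d).2).getD u PySem.Set.empty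
      = PySem.Set.update (d.2.getD u PySem.Set.empty)
          ((l.filter (fun r => PySem.List.pyGetD (PySem.Str.split₀ r) 1 "" == u)).map
            (fun r => PySem.List.pyGetD (PySem.Str.split₀ r) 0 "")) := by
  induction l generalizing d with
  | nil => simp [PySem.Set.update_nil]
  | cons r t ih =>
    rw [List.foldl_cons, ih, List.filter_cons]
    dsimp only
    rw [pv_grp_step]
    by_cases h : PySem.List.pyGetD (PySem.Str.split₀ r) 1 "" = u
    · simp [h, PySem.Set.update_cons]
    · simp [h]

-- counting through a map: notified.count u as a countP on the edge list
theorem pv_count_map_fst (l : List (String × String)) (u : String) :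
    (l.map Prod.fst).count u = l.countP (fun e => e.1 == u) := by
  induction l with
  | nil => rfl
  | cons e t ih => simp [List.count_cons, List.countP_cons, ih]

-- the run scan counts each id once per deduped edge whose reported user's run reaches k,
-- provided edges with equal reported users are contiguous (the list is sorted by .2)
theorem pv_runScan_count (k : Int) (u : String) : ∀ (n : Nat) (l : List (String × String)),
    l.length = n → l.Pairwise (fun a b => a.2 ≤ b.2) →
    (runScan k l).count u
      = l.countP (fun e => e.1 == u && decide (k ≤ (l.countP (fun x => x.2 == e.2) : Int))) := by
  intro n
  induction n using Nat.strong_induction_on with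
  | _ n ih =>
    intro l hn hp
    match l with
    | [] => simp [runScan]
    | e :: t =>
      rw [runScan]
      set p : String × String → Bool := fun x => x.2 == e.2 with hpdef
      have hsplit : t = t.takeWhile p ++ t.dropWhile p := (List.takeWhile_append_dropWhile).symm
      set run := e :: t.takeWhile p with hrun
      set rest := t.dropWhile p with hrest
      have hl : e :: t = run ++ rest := by rw [hrun, hrest]; simp
      -- every element of run has reported user e.2
      have hrun_snd : ∀ x ∈ run, x.2 = e.2 := by
        intro x hx
        rcases List.mem_cons.mp hx with h | h
        · rw [h]
        · have := List.mem_takeWhile_imp h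
          simpa [hpdef] using this
      -- every element of rest has a strictly larger reported user
      have hrest_snd : ∀ x ∈ rest, e.2 < x.2 := by
        cases hr : rest with
        | nil => intro x hx; simp at hx
        | cons h rt =>
          have hd' : t.dropWhile p = h :: rt := by rw [← hrest, hr]
          have hhne : ¬ p h := by
            have := List.head?_dropWhile_not p t
            rw [hd'] at this
            simpa using this
          have hht : h ∈ t := (List.dropWhile_sublist p).subset (by rw [hd']; simp)
          have hhlt : e.2 < h.2 := by
            have h1 : e.2 ≤ h.2 := (List.pairwise_cons.mp hp).1 h hht
            have hne : h.2 ≠ e.2 := by simpa [hpdef] using hhne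
            exact lt_of_le_of_ne h1 (fun hh => hne hh.symm)
          have hpw : (h :: rt).Pairwise (fun a b : String × String => a.2 ≤ b.2) := by
            rw [← hd']
            exact (List.pairwise_cons.mp hp).2.sublist (List.dropWhile_sublist p)
          intro x hx
          rcases List.mem_cons.mp hx with h1 | h1
          · rw [h1]; exact hhlt
          · exact lt_of_lt_of_le hhlt ((List.pairwise_cons.mp hpw).1 x h1)
      have hrest_ne : ∀ x ∈ rest, x.2 ≠ e.2 := fun x hx => ne_of_gt (hrest_snd x hx)
      -- count of e.2 in the whole list is the run length
      have hcnt_run : (run ++ rest).countP p = run.length := by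
        rw [List.countP_append]
        have h1 : run.countP p = run.length :=
          List.countP_eq_length.mpr (fun x hx => by simp [hpdef, hrun_snd x hx])
        have h2 : rest.countP p = 0 :=
          List.countP_eq_zero.mpr (fun x hx => by simp [hpdef, hrest_ne x hx])
        rw [h1, h2, Nat.add_zero]
      -- counts of rest users are unaffected by the run
      have hcnt_rest : ∀ e' ∈ rest, (run ++ rest).countP (fun x => x.2 == e'.2) = rest.countP (fun x => x.2 == e'.2) := by
        intro e' he'
        rw [List.countP_append]
        have h1 : run.countP (fun x => x.2 == e'.2) = 0 :=
          List.countP_eq_zero.mpr (fun x hx => by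
            simp only [hrun_snd x hx, beq_iff_eq]
            exact fun hh => hrest_ne e' he' hh.symm)
        rw [h1, Nat.zero_add]
      have hpw_rest : rest.Pairwise (fun a b : String × String => a.2 ≤ b.2) :=
        (List.pairwise_cons.mp hp).2.sublist (List.dropWhile_sublist p)
      have hlen_rest : rest.length < n := by
        have h1 : rest.length ≤ t.length := by rw [hrest]; exact t.length_dropWhile_le p
        have hn' : t.length + 1 = n := by simpa using hn
        omega
      have hIH := ih rest.length hlen_rest rest rfl hpw_rest
      -- assemble
      rw [List.count_append, hIH]
      conv_rhs => rw [hl]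
      rw [List.countP_append]
      congr 1
      · -- run part
        by_cases hk : k ≤ (run.length : Int)
        · rw [if_pos hk, pv_count_map_fst]
          apply (List.countP_congr ?_).symm
          intro x hx
          have hcx : (run ++ rest).countP (fun y => y.2 == x.2) = run.length := by
            rw [← hcnt_run]
            congr 1
            funext y
            simp [hpdef, hrun_snd x hx]
          rw [hcx]
          simp [hk]
        · rw [if_neg hk]
          symm
          rw [List.count_nil]
          apply List.countP_eq_zero.mpr
          intro x hx
          have hcx : (run ++ rest).countP (fun y => y.2 == x.2) = run.length := by
            rw [← hcnt_run]
            congr 1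
            funext y
            simp [hpdef, hrun_snd x hx]
          rw [hcx]
          simp [hk]
      · -- rest part
        apply List.countP_congr
        intro x hx
        rw [hcnt_rest x hx]

-- ===== VERDICT (by name: the statement is the Claim_ definition above) =====
theorem solution_spec : Claim_equal_solution := by
  intro id_list report k _ _
  unfold Spec_solution solution solution_alt
  dsimp only
  rw [pv_Aloop]
  simp only [pv_rp1_getD, pv_rp2_getD, PySem.Dict.getD_empty, PySem.Set.update_empty]
  apply List.map_congr_left
  intro u _
  set D : List (String × String) := PySem.Set.ofList (report.map pvEdge) with hD
  set es := PySem.List.sorted D (fun e => e.2) false with hes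
  have hperm : es.Perm D := PySem.List.sorted_perm D _ _
  have hpw : es.Pairwise (fun a b : String × String => a.2 ≤ b.2) :=
    PySem.List.sorted_pairwise D _
  have hB : (runScan k es).count u
      = es.countP (fun e => e.1 == u && decide (k ≤ (es.countP (fun x => x.2 == e.2) : Int))) :=
    pv_runScan_count k u es.length es rfl hpw
  have hB2 : (runScan k es).count u
      = D.countP (fun e => e.1 == u && decide (k ≤ (D.countP (fun e' => e'.2 == e.2) : Int))) := by
    rw [hB]
    rw [show (fun e : String × String => e.1 == u && decide (k ≤ (es.countP (fun x => x.2 == e.2) : Int)))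
        = (fun e : String × String => e.1 == u && decide (k ≤ (D.countP (fun e' => e'.2 == e.2) : Int))) by
      funext e
      rw [hperm.countP_eq]]
    exact hperm.countP_eq _
  have hA := pv_per_id report k u
  rw [hD] at hB2
  simp only [pvEdge] at hA hB2
  exact_mod_cast hA.trans hB2.symm
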